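-- pv_equiv track=rewrite | github.com/kerenbe4/interviews | FromInterviews.py | is_syno
-- ===== SOURCE A (Python) =====
-- from typing import List, Tuple, Set, Any, Dict
--
-- def are_syno_words(word_a: str, word_b: str, syno_set: Set[str]) -> bool:
--     key = word_a + ' ' + word_b
--     if key in syno_set:
--         return True
--
--     key = word_b + ' ' + word_a
--     if key in syno_set:
--         return True
--
--     return False
--
-- def is_syno(sent_a: str, sent_b: str, syno: List[Tuple[str, str]]) -> bool:
--     syno_words = set()
--     for words in syno:
--         syno_words.add(words[0] + ' ' + words[1])
--
--     # split sentence into words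
--     s1 = sent_a.split(' ')
--     s2 = sent_b.split(' ')
--
--     if len(s1) != len(s2):
--         return False
--     # iterate over both, and compare
--     for i in range(len(s1)):
--         if s1[i] != s2[i]:
--             if not are_syno_words(s1[i], s2[i], syno_words):
--                 return False
--
--     return True
-- ===== SOURCE B (Python) =====
-- from typing import List, Tuple
--
-- def is_syno(sent_a: str, sent_b: str, syno: List[Tuple[str, str]]) -> bool:
--     # No precomputed index: consume both word lists from the back, checking each
--     # aligned pair directly against the synonym pair list (either order).
--     ws1 = sent_a.split(' ')
--     ws2 = sent_b.split(' ')
--     while ws1 and ws2: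
--         a = ws1.pop()
--         b = ws2.pop()
--         if a != b and (a, b) not in syno and (b, a) not in syno:
--             return False
--     return not ws1 and not ws2
-- ===== Notes on version B (the rewrite author's own statement) =====
-- stated objective: simpler
-- what changed: Drops A's precomputed set of concatenated 'w1 w2' keys and the dual-order helper entirely: B consumes the two word lists back-to-front with pop(), tests each differing aligned pair by direct tuple membership in the syno list (both orders), and detects a length mismatch by which list runs out instead of an upfront len comparison.
import Mathlib
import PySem

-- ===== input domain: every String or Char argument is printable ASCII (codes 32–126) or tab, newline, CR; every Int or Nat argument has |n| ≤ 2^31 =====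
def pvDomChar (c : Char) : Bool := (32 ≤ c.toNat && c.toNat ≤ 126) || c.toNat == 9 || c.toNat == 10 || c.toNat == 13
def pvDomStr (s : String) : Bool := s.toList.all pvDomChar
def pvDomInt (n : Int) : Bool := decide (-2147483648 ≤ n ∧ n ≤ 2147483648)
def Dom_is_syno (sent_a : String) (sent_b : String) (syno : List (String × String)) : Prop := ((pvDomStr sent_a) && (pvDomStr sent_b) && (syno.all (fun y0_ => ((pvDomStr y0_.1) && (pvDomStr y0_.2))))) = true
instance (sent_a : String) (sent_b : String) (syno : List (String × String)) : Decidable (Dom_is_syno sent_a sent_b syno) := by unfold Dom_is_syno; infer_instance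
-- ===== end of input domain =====

-- B drops A's precomputed concatenated-key set and dual-order helper: it consumes both
-- word lists back-to-front, testing each differing pair directly against the syno list
-- in either order, with the length mismatch detected by exhaustion (simpler; no index).

-- ===== PORT A =====
-- are_syno_words(word_a, word_b, syno_set)
def are_syno_words (word_a word_b : List Char) (syno_set : PySem.Set (List Char)) : Bool :=
  let key := word_a ++ [' '] ++ word_b
  if PySem.Set.contains syno_set key then true
  else
    let key := word_b ++ [' '] ++ word_a
    if PySem.Set.contains syno_set key then true
    else false

-- 'for i in range(len(s1)): if s1[i] != s2[i]: if not are_syno_words(...): return False'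
def is_syno_loop (syno_words : PySem.Set (List Char)) (s1 s2 : List (List Char)) : List Nat → Bool
  | [] => true
  | i :: is =>
    if s1.getD i [] ≠ s2.getD i [] then
      if ¬ are_syno_words (s1.getD i []) (s2.getD i []) syno_words then false
      else is_syno_loop syno_words s1 s2 is
    else is_syno_loop syno_words s1 s2 is

def is_syno (sent_a : String) (sent_b : String) (syno : List (String × String)) : Bool :=
  let syno_words : PySem.Set (List Char) :=
    syno.foldl (fun s words => PySem.Set.add s (words.1.toList ++ [' '] ++ words.2.toList)) PySem.Set.empty
  let s1 := PySem.Chars.splitOn sent_a.toList [' ']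
  let s2 := PySem.Chars.splitOn sent_b.toList [' ']
  if s1.length ≠ s2.length then false
  else is_syno_loop syno_words s1 s2 (List.range s1.length)

-- ===== PORT B =====
-- 'while ws1 and ws2: a = ws1.pop(); b = ws2.pop(); if a != b and (a,b) not in syno
--  and (b,a) not in syno: return False' then 'return not ws1 and not ws2'
def is_syno_alt_loop (syno : List (List Char × List Char)) (ws1 ws2 : List (List Char)) : Bool :=
  if h1 : ws1 = [] then ws2.isEmpty
  else if h2 : ws2 = [] then false
  else
    let a := ws1.getLast h1
    let b := ws2.getLast h2
    if a ≠ b ∧ (a, b) ∉ syno ∧ (b, a) ∉ syno then false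
    else is_syno_alt_loop syno ws1.dropLast ws2.dropLast
termination_by ws1.length
decreasing_by
  simp only [List.length_dropLast]
  cases ws1 with
  | nil => simp at h1
  | cons x xs => simp

def is_syno_alt (sent_a : String) (sent_b : String) (syno : List (String × String)) : Bool :=
  let ws1 := PySem.Chars.splitOn sent_a.toList [' ']
  let ws2 := PySem.Chars.splitOn sent_b.toList [' ']
  is_syno_alt_loop (syno.map (fun p => (p.1.toList, p.2.toList))) ws1 ws2

-- ===== PRECONDITION & SPEC =====
def Spec_is_syno (sent_a : String) (sent_b : String) (syno : List (String × String)) (out : Bool) : Prop := out = is_syno_alt sent_a sent_b syno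
instance (sent_a : String) (sent_b : String) (syno : List (String × String)) (out : Bool) : Decidable (Spec_is_syno sent_a sent_b syno out) := by unfold Spec_is_syno; infer_instance

-- ===== CLAIM (what is proved, stated in full; the proofs are below) =====
def Claim_equal_is_syno : Prop := ∀ (sent_a : String) (sent_b : String) (syno : List (String × String)), Dom_is_syno sent_a sent_b syno → Spec_is_syno sent_a sent_b syno (is_syno sent_a sent_b syno)

-- ===== LEMMAS AND PROOFS =====

-- words produced by splitting on ' ' contain no ' '
lemma splitOn_go_no_space (fuel : Nat) : ∀ (l cur : List Char) (acc : List (List Char)),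
    l.length < fuel → (' ' ∉ cur) → (∀ w ∈ acc, ' ' ∉ w) →
    ∀ w ∈ PySem.Chars.splitOn.go [' '] fuel l cur acc, ' ' ∉ w := by
  induction fuel with
  | zero => intro l cur acc h; omega
  | succ fuel ih =>
    intro l cur acc hlen hcur hacc w hw
    match l with
    | [] =>
      simp [PySem.Chars.splitOn.go, List.mem_reverse, List.mem_cons] at hw
      rcases hw with h | h
      · exact hacc _ h
      · subst h; simpa using hcur
    | c :: rest =>
      rw [PySem.Chars.splitOn.go] at hw
      by_cases hp : [' '].isPrefixOf (c :: rest) = true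
      · simp only [hp, if_true] at hw
        have hrl : (List.drop 1 (c :: rest)).length < fuel := by
          simp at hlen ⊢; omega
        refine ih _ [] (cur.reverse :: acc) hrl (by simp) ?_ w hw
        intro v hv
        rcases List.mem_cons.mp hv with rfl | hv'
        · simpa using hcur
        · exact hacc _ hv'
      · simp only [hp, if_false, Bool.false_eq_true] at hw
        have hc : c ≠ ' ' := by
          intro h; subst h; simp [List.isPrefixOf] at hp
        have hrl : rest.length < fuel := by simp at hlen; omega
        refine ih rest (c :: cur) acc hrl ?_ hacc w hw
        intro h
        rcases List.mem_cons.mp h with h | h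
        · exact hc h.symm
        · exact hcur h

lemma splitOn_no_space (s : List Char) : ∀ w ∈ PySem.Chars.splitOn s [' '], ' ' ∉ w := by
  intro w hw
  exact splitOn_go_no_space (s.length + 1) s [] [] (by omega) (by simp) (by simp) w
    (by simpa [PySem.Chars.splitOn] using hw)

-- concatenation with a single ' ' is injective when the right-hand words are space-free
lemma space_key_aux (p0 : List Char) : ∀ (p1 w1 w2 : List Char), ' ' ∉ w1 → ' ' ∉ w2 →
    p0 ++ [' '] ++ p1 = w1 ++ [' '] ++ w2 → p0 = w1 ∧ p1 = w2 := by
  induction p0 with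
  | nil =>
    intro p1 w1 w2 h1 h2 h
    match w1 with
    | [] => simpa using h
    | c :: w1' =>
      exfalso
      have : ' ' = c := by simpa using congrArg (fun l => l.head?) h
      exact h1 (by simp [← this])
  | cons c p0' ih =>
    intro p1 w1 w2 h1 h2 h
    match w1 with
    | [] =>
      exfalso
      have hc : c = ' ' := by simpa using congrArg (fun l => l.head?) h
      have ht : p0' ++ [' '] ++ p1 = w2 := by
        have := congrArg (fun l => l.tail) h
        simpa using this
      exact h2 (by rw [← ht]; simp)
    | c1 :: w1' =>
      have hc : c = c1 := by simpa using congrArg (fun l => l.head?) h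
      have ht : p0' ++ [' '] ++ p1 = w1' ++ [' '] ++ w2 := by
        have := congrArg (fun l => l.tail) h
        simpa using this
      have h1' : ' ' ∉ w1' := fun hmem => h1 (by simp [hmem])
      obtain ⟨e1, e2⟩ := ih p1 w1' w2 h1' h2 ht
      exact ⟨by simp [hc, e1], e2⟩

lemma space_key_inj (p0 p1 w1 w2 : List Char) (h1 : ' ' ∉ w1) (h2 : ' ' ∉ w2) :
    p0 ++ [' '] ++ p1 = w1 ++ [' '] ++ w2 ↔ p0 = w1 ∧ p1 = w2 := by
  constructor
  · exact space_key_aux p0 p1 w1 w2 h1 h2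
  · rintro ⟨rfl, rfl⟩; rfl

-- A's synonym-key set: membership characterisation
lemma mem_syno_words (syno : List (String × String)) (key : List Char) :
    key ∈ syno.foldl (fun s words => PySem.Set.add s (words.1.toList ++ [' '] ++ words.2.toList)) PySem.Set.empty
      ↔ ∃ p ∈ syno, p.1.toList ++ [' '] ++ p.2.toList = key := by
  rw [← PySem.Set.update_map_eq_foldl_add syno (fun p => p.1.toList ++ [' '] ++ p.2.toList) PySem.Set.empty,
    PySem.Set.update_empty, PySem.Set.mem_ofList, List.mem_map]

lemma set_contains_iff {α : Type} [BEq α] [LawfulBEq α] (s : PySem.Set α) (x : α) :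
    PySem.Set.contains s x = true ↔ x ∈ s := by
  simp [PySem.Set.contains]

-- A's loop is the 'all' of its per-index condition
lemma is_syno_loop_eq_all (sw : PySem.Set (List Char)) (s1 s2 : List (List Char)) (is : List Nat) :
    is_syno_loop sw s1 s2 is
      = is.all (fun i => (s1.getD i [] == s2.getD i []) || are_syno_words (s1.getD i []) (s2.getD i []) sw) := by
  induction is with
  | nil => rfl
  | cons i is ih =>
    rw [is_syno_loop, List.all_cons, ih]
    by_cases h : s1.getD i [] = s2.getD i []
    · rw [if_neg (by simpa using h)]
      have hb : (s1.getD i [] == s2.getD i []) = true := by simpa using h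
      rw [hb, Bool.true_or, Bool.true_and]
    · rw [if_pos (by simpa using h)]
      have hb : (s1.getD i [] == s2.getD i []) = false := by simpa using h
      rw [hb, Bool.false_or]
      by_cases ha : are_syno_words (s1.getD i []) (s2.getD i []) sw = true
      · rw [if_neg (by simpa using ha), ha, Bool.true_and]
      · rw [if_pos (by simpa using ha), Bool.eq_false_iff.mpr ha, Bool.false_and]

-- 'all' over indices equals 'all' over the zip when the lengths agree
lemma all_range_eq_all_zip {α : Type} [Inhabited α] (s1 s2 : List α) (dflt : α)
    (h : s1.length = s2.length) (f : α → α → Bool) :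
    (List.range s1.length).all (fun i => f (s1.getD i dflt) (s2.getD i dflt))
      = (s1.zip s2).all (fun p => f p.1 p.2) := by
  induction s1 generalizing s2 with
  | nil => simp
  | cons x xs ih =>
    match s2 with
    | [] => simp at h
    | y :: ys =>
      have h' : xs.length = ys.length := by simpa using h
      simp only [List.length_cons, List.range_succ_eq_map, List.all_cons, List.all_map,
        List.zip_cons_cons]
      have hg : ((fun i => f ((x :: xs).getD i dflt) ((y :: ys).getD i dflt)) ∘ Nat.succ)
          = (fun i => f (xs.getD i dflt) (ys.getD i dflt)) := by
        funext i
        simp [Function.comp]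
      rw [hg, ih ys h']
      rfl

-- B's per-pair pass condition, as a Bool
def passB (syno : List (String × String)) (w1 w2 : List Char) : Bool :=
  (w1 == w2) || decide ((w1, w2) ∈ syno.map (fun p => (p.1.toList, p.2.toList)))
    || decide ((w2, w1) ∈ syno.map (fun p => (p.1.toList, p.2.toList)))

-- B's loop computes the length check together with 'all passB' over the zip
lemma is_syno_alt_loop_eq (syno : List (String × String)) (ws1 ws2 : List (List Char)) :
    is_syno_alt_loop (syno.map (fun p => (p.1.toList, p.2.toList))) ws1 ws2
      = ((ws1.length == ws2.length) && (ws1.zip ws2).all (fun p => passB syno p.1 p.2)) := by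
  induction ws1 using List.reverseRecOn generalizing ws2 with
  | nil =>
    rw [is_syno_alt_loop]
    cases ws2 <;> simp
  | append_singleton xs x ih =>
    rcases List.eq_nil_or_concat ws2 with rfl | ⟨ys, y, rfl⟩
    · rw [is_syno_alt_loop, dif_neg (by simp), dif_pos rfl]
      simp
    · rw [is_syno_alt_loop, dif_neg (by simp), dif_neg (by simp)]
      simp only [← List.concat_eq_append, List.getLast_concat']
      simp only [List.concat_eq_append]
      by_cases hc : x ≠ y ∧ (x, y) ∉ syno.map (fun p => (p.1.toList, p.2.toList))
          ∧ (y, x) ∉ syno.map (fun p => (p.1.toList, p.2.toList))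
      · rw [if_pos hc]
        by_cases hl : xs.length = ys.length
        · have hz : (xs ++ [x]).zip (ys ++ [y]) = xs.zip ys ++ [(x, y)] := by
            rw [List.zip_append hl]; rfl
          have hpass : passB syno x y = false := by
            unfold passB
            simp only [Bool.or_eq_false_iff, beq_eq_false_iff_ne, decide_eq_false_iff_not]
            exact ⟨⟨hc.1, hc.2.1⟩, hc.2.2⟩
          rw [hz]
          simp [hpass]
        · have hlen : ((xs ++ [x]).length == (ys ++ [y]).length) = false := by
            simp; omega
          rw [hlen, Bool.false_and]
      · rw [if_neg hc, show (xs ++ [x]).dropLast = xs from by simp,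
          show (ys ++ [y]).dropLast = ys from by simp, ih]
        by_cases hl : xs.length = ys.length
        · have hz : (xs ++ [x]).zip (ys ++ [y]) = xs.zip ys ++ [(x, y)] := by
            rw [List.zip_append hl]; rfl
          have hpass : passB syno x y = true := by
            unfold passB
            rcases not_and_or.mp hc with h | h
            · simp only [Ne, not_not] at h; simp [h]
            · rcases not_and_or.mp h with h' | h' <;> simp only [not_not] at h' <;> simp [h']
          rw [hz]
          simp [hpass, hl]
        · have hl1 : ((xs ++ [x]).length == (ys ++ [y]).length) = false := by
            simp; omega
          have hl2 : (xs.length == ys.length) = false := by simpa using hl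
          rw [hl1, hl2, Bool.false_and, Bool.false_and]

-- A's ordered key lookup equals direct ordered-pair membership, for space-free words
lemma contains_key (syno : List (String × String)) (w1 w2 : List Char)
    (h1 : ' ' ∉ w1) (h2 : ' ' ∉ w2) :
    PySem.Set.contains
        (syno.foldl (fun s words => PySem.Set.add s (words.1.toList ++ [' '] ++ words.2.toList)) PySem.Set.empty)
        (w1 ++ [' '] ++ w2)
      = decide ((w1, w2) ∈ syno.map (fun p => (p.1.toList, p.2.toList))) := by
  rw [Bool.eq_iff_iff, set_contains_iff, mem_syno_words]
  simp only [decide_eq_true_eq, List.mem_map, Prod.mk.injEq, Prod.exists]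
  constructor
  · rintro ⟨a, b, hp, hkey⟩
    rw [space_key_inj _ _ _ _ h1 h2] at hkey
    exact ⟨a, b, hp, hkey.1, hkey.2⟩
  · rintro ⟨a, b, hp, ha, hb⟩
    exact ⟨a, b, hp, by rw [ha, hb]⟩

-- per-position condition equivalence (for space-free words)
lemma cond_equiv (syno : List (String × String)) (w1 w2 : List Char)
    (h1 : ' ' ∉ w1) (h2 : ' ' ∉ w2) :
    ((w1 == w2) || are_syno_words w1 w2
        (syno.foldl (fun s words => PySem.Set.add s (words.1.toList ++ [' '] ++ words.2.toList)) PySem.Set.empty))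
      = passB syno w1 w2 := by
  unfold passB are_syno_words
  rw [Bool.or_assoc]
  congr 1
  simp only []
  rw [contains_key syno w1 w2 h1 h2, contains_key syno w2 w1 h2 h1]
  cases hm1 : decide ((w1, w2) ∈ syno.map (fun p => (p.1.toList, p.2.toList))) <;>
    cases hm2 : decide ((w2, w1) ∈ syno.map (fun p => (p.1.toList, p.2.toList))) <;> simp

lemma all_congr_mem {α : Type} (l : List α) (p q : α → Bool) (h : ∀ x ∈ l, p x = q x) :
    l.all p = l.all q := by
  induction l with
  | nil => rfl
  | cons x xs ih =>
    rw [List.all_cons, List.all_cons, h x List.mem_cons_self,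
      ih (fun y hy => h y (List.mem_cons_of_mem _ hy))]

-- ===== VERDICT (by name: the statement is the Claim_ definition above) =====
theorem is_syno_spec : Claim_equal_is_syno := by
  intro sent_a sent_b syno _
  unfold Spec_is_syno is_syno is_syno_alt
  simp only []
  rw [is_syno_alt_loop_eq]
  by_cases hlen : (PySem.Chars.splitOn sent_a.toList [' ']).length = (PySem.Chars.splitOn sent_b.toList [' ']).length
  · rw [if_neg (by simp [hlen])]
    have hb : ((PySem.Chars.splitOn sent_a.toList [' ']).length == (PySem.Chars.splitOn sent_b.toList [' ']).length) = true := by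
      simpa using hlen
    rw [hb, Bool.true_and]
    rw [is_syno_loop_eq_all,
      all_range_eq_all_zip _ _ [] hlen
        (fun w1 w2 => (w1 == w2) || are_syno_words w1 w2
          (syno.foldl (fun s words => PySem.Set.add s (words.1.toList ++ [' '] ++ words.2.toList)) PySem.Set.empty))]
    apply all_congr_mem
    intro p hp
    obtain ⟨hp1, hp2⟩ := List.of_mem_zip hp
    exact cond_equiv syno p.1 p.2 (splitOn_no_space _ _ hp1) (splitOn_no_space _ _ hp2)
  · rw [if_pos (by simpa using hlen)]
    have hb : ((PySem.Chars.splitOn sent_a.toList [' ']).length == (PySem.Chars.splitOn sent_b.toList [' ']).length) = false := by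
      simpa using hlen
    rw [hb, Bool.false_and]
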